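-- pv_equiv track=rewrite | github.com/Clamepending/semantic-autogaze | semantic_autogaze/ensemble_vote_sim.py | config_accuracy
-- ===== SOURCE A (Python) =====
-- def config_accuracy(pred: dict[str, dict[str, str]], gt: dict[str, str], configs: list[str]) -> list[tuple[str, int, int]]:
--     acc = []
--     for c in configs:
--         correct = 0
--         total = 0
--         for qid, g in gt.items():
--             p = pred[qid].get(c)
--             if p is None:
--                 continue
--             total += 1
--             if p == g:
--                 correct += 1
--         acc.append((c, correct, total))
--     acc.sort(key=lambda x: -x[1])
--     return acc
-- ===== SOURCE B (Python) =====
-- def config_accuracy(pred: dict[str, dict[str, str]], gt: dict[str, str], configs: list[str]) -> list[tuple[str, int, int]]: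
--     # Single pass over gt; one (correct, total) counter dict keyed by distinct config.
--     counts = {c: (0, 0) for c in configs}
--     if configs:
--         for qid, g in gt.items():
--             prow = pred[qid]
--             for c in counts:
--                 p = prow.get(c)
--                 if p is not None:
--                     cor, tot = counts[c]
--                     counts[c] = (cor + (p == g), tot + 1)
--     acc = [(c,) + counts[c] for c in configs]
--     acc.sort(key=lambda x: -x[1])
--     return acc
-- ===== Notes on version B (the rewrite author's own statement) =====
-- stated objective: alternative
-- what changed: Loops are interchanged: instead of re-scanning gt (and re-indexing pred[qid]) once per config entry, B makes a single pass over gt maintaining a (correct,total) counter dict over the distinct configs, then emits tuples per configs occurrence and applies the same sort.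
import Mathlib
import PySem

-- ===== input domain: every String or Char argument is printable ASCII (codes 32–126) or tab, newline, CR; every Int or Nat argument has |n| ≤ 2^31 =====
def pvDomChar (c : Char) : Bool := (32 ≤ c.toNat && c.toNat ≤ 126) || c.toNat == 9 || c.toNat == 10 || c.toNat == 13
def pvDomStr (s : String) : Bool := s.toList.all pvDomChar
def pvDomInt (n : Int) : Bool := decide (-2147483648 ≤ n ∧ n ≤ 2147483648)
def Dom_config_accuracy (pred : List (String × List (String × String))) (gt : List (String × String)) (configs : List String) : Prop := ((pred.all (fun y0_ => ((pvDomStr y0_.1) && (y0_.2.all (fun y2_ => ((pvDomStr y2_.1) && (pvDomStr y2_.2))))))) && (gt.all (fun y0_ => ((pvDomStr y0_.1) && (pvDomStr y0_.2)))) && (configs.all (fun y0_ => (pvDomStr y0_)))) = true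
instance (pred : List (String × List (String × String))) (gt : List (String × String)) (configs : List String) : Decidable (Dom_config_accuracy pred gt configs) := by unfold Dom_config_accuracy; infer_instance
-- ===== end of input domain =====

-- B interchanges A's loops: one pass over gt with a (correct,total) counter dict over the
-- distinct configs, instead of one gt scan per configs entry; same output, same sort.

-- ===== PORT A =====
-- pred[qid] raises KeyError when qid is missing; Pre_ excludes that, so '(… .get? qg.1).getD []' is exact on Pre_.
def config_accuracy (pred : List (String × List (String × String))) (gt : List (String × String)) (configs : List String) : List (String × Int × Int) :=
  let predd := PySem.Dict.ofList pred
  let gtItems := (PySem.Dict.ofList gt).items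
  let acc := configs.foldl (fun acc c =>
    let ct := gtItems.foldl (fun (ct : Int × Int) qg =>
      match (PySem.Dict.ofList ((predd.get? qg.1).getD [])).get? c with
      | none => ct
      | some p => (ct.1 + (if p = qg.2 then 1 else 0), ct.2 + 1)) ((0 : Int), (0 : Int))
    acc ++ [(c, ct)]) []
  PySem.List.sorted acc (fun x => -x.2.1) false

-- ===== PORT B =====
-- 'for c in counts: …' of Source B: fold over the dict's key list; counts[c] with c a key → getD is exact.
def pvBInner (g : String) (prow : PySem.Dict String String) (counts : PySem.Dict String (Int × Int)) : PySem.Dict String (Int × Int) :=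
  counts.keys.foldl (fun d c =>
    match prow.get? c with
    | none => d
    | some p =>
      let ct := d.getD c ((0 : Int), (0 : Int))
      d.insert c (ct.1 + (if p = g then 1 else 0), ct.2 + 1)) counts

def config_accuracy_alt (pred : List (String × List (String × String))) (gt : List (String × String)) (configs : List String) : List (String × Int × Int) :=
  let counts0 := configs.foldl (fun d c => d.insert c (((0 : Int)), ((0 : Int)))) PySem.Dict.empty
  let predd := PySem.Dict.ofList pred
  let counts := if configs.isEmpty then counts0
    else (PySem.Dict.ofList gt).items.foldl
      (fun d qg => pvBInner qg.2 (PySem.Dict.ofList ((predd.get? qg.1).getD [])) d) counts0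
  let acc := configs.map (fun c => (c, counts.getD c (0, 0)))
  PySem.List.sorted acc (fun x => -x.2.1) false

-- ===== PRECONDITION & SPEC =====
-- Pre_ excludes exactly the inputs where A raises KeyError: configs non-empty and some gt key missing from pred.
def Pre_config_accuracy (pred : List (String × List (String × String))) (gt : List (String × String)) (configs : List String) : Prop :=
  configs = [] ∨ ∀ qg ∈ (PySem.Dict.ofList gt).items, (PySem.Dict.ofList pred).contains qg.1 = true
instance (pred : List (String × List (String × String))) (gt : List (String × String)) (configs : List String) : Decidable (Pre_config_accuracy pred gt configs) := by unfold Pre_config_accuracy; infer_instance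
def pvWitness_config_accuracy : (List (String × List (String × String))) × (List (String × String)) × List String :=
  ([("q", [("c", "x")])], [("q", "x")], ["c"])

def Spec_config_accuracy (pred : List (String × List (String × String))) (gt : List (String × String)) (configs : List String) (out : List (String × Int × Int)) : Prop := out = config_accuracy_alt pred gt configs
instance (pred : List (String × List (String × String))) (gt : List (String × String)) (configs : List String) (out : List (String × Int × Int)) : Decidable (Spec_config_accuracy pred gt configs out) := by unfold Spec_config_accuracy; infer_instance

-- ===== CLAIM (what is proved, stated in full; the proofs are below) =====
def Claim_equal_config_accuracy : Prop := ∀ (pred : List (String × List (String × String))) (gt : List (String × String)) (configs : List String), Dom_config_accuracy pred gt configs → Pre_config_accuracy pred gt configs → Spec_config_accuracy pred gt configs (config_accuracy pred gt configs)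

-- ===== LEMMAS AND PROOFS =====

-- A's per-config count over one gt item
def pvStep (prow : PySem.Dict String String) (g : String) (c : String) (ct : Int × Int) : Int × Int :=
  match prow.get? c with
  | none => ct
  | some p => (ct.1 + (if p = g then 1 else 0), ct.2 + 1)

lemma pvInner_getD (g : String) (prow : PySem.Dict String String)
    (ks : List String) (hnd : ks.Nodup) (d : PySem.Dict String (Int × Int)) (c : String) :
    (ks.foldl (fun d c =>
      match prow.get? c with
      | none => d
      | some p =>
        let ct := d.getD c ((0 : Int), (0 : Int))
        d.insert c (ct.1 + (if p = g then 1 else 0), ct.2 + 1)) d).getD c (0, 0) =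
    if c ∈ ks then pvStep prow g c (d.getD c (0, 0)) else d.getD c (0, 0) := by
  induction ks generalizing d with
  | nil => simp
  | cons k ks ih =>
    rw [List.nodup_cons] at hnd
    rw [List.foldl_cons, ih hnd.2]
    by_cases hck : c = k
    · subst hck
      rw [if_neg hnd.1, if_pos (by simp)]
      cases hp : prow.get? c with
      | none => simp [pvStep, hp]
      | some p => simp [pvStep, hp]
    · have hstep : (match prow.get? k with
        | none => d
        | some p =>
          let ct := d.getD k ((0 : Int), (0 : Int))
          d.insert k (ct.1 + (if p = g then 1 else 0), ct.2 + 1)).getD c (0, 0) = d.getD c (0, 0) := by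
        cases hp : prow.get? k with
        | none => rfl
        | some p => simp [PySem.Dict.getD_insert, hck]
      rw [hstep]
      simp [List.mem_cons, hck]

lemma pvInner_keys (g : String) (prow : PySem.Dict String String)
    (ks : List String) (d : PySem.Dict String (Int × Int)) (hks : ∀ k ∈ ks, k ∈ d.keys) :
    (ks.foldl (fun d c =>
      match prow.get? c with
      | none => d
      | some p =>
        let ct := d.getD c ((0 : Int), (0 : Int))
        d.insert c (ct.1 + (if p = g then 1 else 0), ct.2 + 1)) d).keys = d.keys := by
  induction ks generalizing d with
  | nil => rfl
  | cons k ks ih =>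
    have hk : k ∈ d.keys := hks k (by simp)
    have hstep : (match prow.get? k with
        | none => d
        | some p =>
          let ct := d.getD k ((0 : Int), (0 : Int))
          d.insert k (ct.1 + (if p = g then 1 else 0), ct.2 + 1)).keys = d.keys := by
      cases hp : prow.get? k with
      | none => rfl
      | some p =>
        exact PySem.Dict.keys_insert_of_contains _ _ ((PySem.Dict.contains_iff_mem_keys d k).mpr hk)
    rw [List.foldl_cons, ih _ (by intro x hx; rw [hstep]; exact hks x (by simp [hx])), hstep]

lemma pvBInner_keys (g : String) (prow : PySem.Dict String String) (d : PySem.Dict String (Int × Int)) :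
    (pvBInner g prow d).keys = d.keys :=
  pvInner_keys g prow d.keys d (fun _ h => h)

lemma pvBInner_getD (g : String) (prow : PySem.Dict String String)
    (d : PySem.Dict String (Int × Int)) (hnd : d.keys.Nodup) (c : String) (hc : c ∈ d.keys) :
    (pvBInner g prow d).getD c (0, 0) = pvStep prow g c (d.getD c (0, 0)) := by
  unfold pvBInner
  rw [pvInner_getD g prow d.keys hnd d c, if_pos hc]

lemma pvOuter_getD (predd : PySem.Dict String (List (String × String)))
    (l : List (String × String)) (d : PySem.Dict String (Int × Int))
    (hnd : d.keys.Nodup) (c : String) (hc : c ∈ d.keys) :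
    (l.foldl (fun d qg => pvBInner qg.2 (PySem.Dict.ofList ((predd.get? qg.1).getD [])) d) d).getD c (0, 0) =
    l.foldl (fun ct qg => pvStep (PySem.Dict.ofList ((predd.get? qg.1).getD [])) qg.2 c ct) (d.getD c (0, 0)) := by
  induction l generalizing d with
  | nil => rfl
  | cons qg l ih =>
    rw [List.foldl_cons, List.foldl_cons,
      ih _ (by rw [pvBInner_keys]; exact hnd) (by rw [pvBInner_keys]; exact hc),
      pvBInner_getD _ _ _ hnd c hc]

lemma pvCounts0_keys (configs : List String) :
    (configs.foldl (fun d c => d.insert c (((0 : Int)), ((0 : Int)))) PySem.Dict.empty).keys =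
    PySem.Set.ofList configs := by
  rw [PySem.Dict.keys_foldl_insert]
  simp [PySem.Dict.keys_empty, PySem.Set.update, PySem.Set.ofList_eq_foldl]

lemma pvCounts0_nodup (configs : List String) :
    (configs.foldl (fun d c => d.insert c (((0 : Int)), ((0 : Int)))) PySem.Dict.empty).keys.Nodup :=
  PySem.Dict.nodup_keys_foldl_insert _ _ _ (by simp [PySem.Dict.keys_empty])

lemma pvCounts0_getD (configs : List String) (c : String) :
    (configs.foldl (fun d c => d.insert c (((0 : Int)), ((0 : Int)))) PySem.Dict.empty).getD c (0, 0) = (0, 0) := by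
  have h : ∀ (d : PySem.Dict String (Int × Int)), d.getD c (0, 0) = (0, 0) →
      (configs.foldl (fun d c => d.insert c (((0 : Int)), ((0 : Int)))) d).getD c (0, 0) = (0, 0) := by
    induction configs with
    | nil => intro d hd; exact hd
    | cons k ks ih =>
      intro d hd
      rw [List.foldl_cons]
      apply ih
      rw [PySem.Dict.getD_insert]
      split_ifs <;> simp [hd]
  exact h _ (by simp [PySem.Dict.getD_empty])

-- ===== VERDICT (by name: the statement is the Claim_ definition above) =====
theorem config_accuracy_spec : Claim_equal_config_accuracy := by
  intro pred gt configs _ _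
  unfold Spec_config_accuracy config_accuracy config_accuracy_alt
  dsimp only
  congr 1
  rw [PySem.List.foldl_append_singleton_eq_map, List.nil_append]
  cases hc : configs.isEmpty with
  | true =>
    have h0 : configs = [] := List.isEmpty_iff.mp hc
    subst h0; rfl
  | false =>
    rw [if_neg (by simp)]
    apply List.map_congr_left
    intro c hcmem
    congr 1
    rw [pvOuter_getD (PySem.Dict.ofList pred) _ _ (pvCounts0_nodup configs) c
      (by rw [pvCounts0_keys]; exact (PySem.Set.mem_ofList _ _).mpr hcmem),
      pvCounts0_getD]
    rfl
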